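-- pv_equiv track=rewrite | github.com/BoSuY0/Diia_Hakaton | backend/domain/validation/iban.py | _mod97
-- ===== SOURCE A (Python) =====
-- def _mod97(iban: str) -> bool:
--     """
--     Перевірка IBAN через MOD-97 (ISO 13616).
--     """
--     if len(iban) < 4:
--         return False
--     # Переносимо перші 4 символи в кінець
--     rearranged = iban[4:] + iban[:4]
--     remainder = 0
--     for ch in rearranged:
--         if ch.isdigit():
--             remainder = (remainder * 10 + int(ch)) % 97
--         else:
--             # A=10, B=11, ...
--             for c in str(ord(ch.upper()) - 55):
--                 remainder = (remainder * 10 + int(c)) % 97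
--     return remainder == 1
-- ===== SOURCE B (Python) =====
-- def _mod97(iban: str) -> bool:
--     if len(iban) < 4:
--         return False
--     r, p = 0, 1
--     for ch in reversed(iban[4:] + iban[:4]):
--         v = ord(ch) - 48 if ch.isdigit() else ord(ch.upper()) - 55
--         r = (r + v * p) % 97
--         p = p * (100 if v >= 10 else 10) % 97
--     return r == 1
-- ===== Notes on version B (the rewrite author's own statement) =====
-- stated objective: faster
-- what changed: B replaces A's left-to-right Horner fold with its per-letter str()/int() round-trip and inner digit loop by a single right-to-left pass keeping a running power of 10 mod 97 and adding each character's value times that weight.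
import Mathlib
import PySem

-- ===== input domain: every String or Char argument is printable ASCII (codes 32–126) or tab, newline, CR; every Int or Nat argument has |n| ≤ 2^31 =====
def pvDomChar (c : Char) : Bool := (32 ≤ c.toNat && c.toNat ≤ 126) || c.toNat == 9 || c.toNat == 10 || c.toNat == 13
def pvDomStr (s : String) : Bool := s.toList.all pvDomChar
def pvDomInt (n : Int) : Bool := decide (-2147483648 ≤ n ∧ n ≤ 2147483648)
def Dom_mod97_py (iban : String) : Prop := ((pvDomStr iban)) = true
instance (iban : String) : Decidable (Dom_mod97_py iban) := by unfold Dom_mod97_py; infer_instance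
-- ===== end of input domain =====

-- B replaces A's left-to-right Horner fold (with its str()/int() round-trip and inner digit loop)
-- by a right-to-left weighted sum with a running power of 10 mod 97 (objective: faster, constant factor; measured).

-- ===== PORT A =====
-- one loop step of A; Option models the ValueError raised by int() on the sign character when ord(ch.upper())-55 < 0
def mod97A_step (acc : Option Int) (ch : Char) : Option Int :=
  match acc with
  | none => none
  | some r =>
    if PySem.Chars.isdigit ch then
      -- int(ch) for a checked ASCII digit ch: exact on Dom (printable ASCII)
      some (PySem.Int.mod (r * 10 + ((ch.toNat : Int) - 48)) 97)
    else
      (PySem.Int.toChars (((PySem.Chars.upperChar ch).toNat : Int) - 55)).foldl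
        (fun acc2 c =>
          match acc2 with
          | none => none
          | some r2 =>
            match PySem.Int.ofChars? [c] with
            | none => none
            | some d => some (PySem.Int.mod (r2 * 10 + d) 97))
        (some r)

def mod97_py (iban : String) : Bool :=
  if iban.toList.length < 4 then false
  else
    let rearranged :=
      PySem.List.slice iban.toList (some 4) none ++ PySem.List.slice iban.toList none (some 4)
    match rearranged.foldl mod97A_step (some (0 : Int)) with
    | none => false        -- unreachable under Pre_mod97_py (the Python raises there)
    | some r => r == 1

-- ===== PORT B =====
-- one loop step of B: state (r, p) = (weighted sum so far mod 97, current power of 10 mod 97)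
def mod97B_step (st : Int × Int) (ch : Char) : Int × Int :=
  let v : Int := if PySem.Chars.isdigit ch then (ch.toNat : Int) - 48
                 else ((PySem.Chars.upperChar ch).toNat : Int) - 55
  (PySem.Int.mod (st.1 + v * st.2) 97,
   PySem.Int.mod (st.2 * (if v ≥ 10 then 100 else 10)) 97)

def mod97_py_alt (iban : String) : Bool :=
  if iban.toList.length < 4 then false
  else
    let st :=
      (PySem.List.slice iban.toList (some 4) none ++
        PySem.List.slice iban.toList none (some 4)).reverse.foldl mod97B_step ((0 : Int), (1 : Int))
    st.1 == 1

-- ===== PRECONDITION & SPEC =====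
-- Pre_ excludes exactly the inputs where A raises ValueError: length ≥ 4 and some character
-- that is neither a digit nor has ord(ch.upper()) ≥ 55 (there A feeds int() the minus sign of a negative str() and raises).
def Pre_mod97_py (iban : String) : Prop :=
  iban.toList.length < 4 ∨
    iban.toList.all (fun c => PySem.Chars.isdigit c || decide (55 ≤ (PySem.Chars.upperChar c).toNat)) = true
instance (iban : String) : Decidable (Pre_mod97_py iban) := by unfold Pre_mod97_py; infer_instance

def pvWitness_mod97_py : String := "GB82WEST12345698765432"

def Spec_mod97_py (iban : String) (out : Bool) : Prop := out = mod97_py_alt iban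
instance (iban : String) (out : Bool) : Decidable (Spec_mod97_py iban out) := by unfold Spec_mod97_py; infer_instance

-- ===== CLAIM (what is proved, stated in full; the proofs are below) =====
def Claim_equal_mod97_py : Prop := ∀ (iban : String), Dom_mod97_py iban → Pre_mod97_py iban → Spec_mod97_py iban (mod97_py iban)

-- ===== LEMMAS AND PROOFS =====

-- the numeric value v and decimal width factor w of one character, and the abstract number
def pvV (c : Char) : Int :=
  if PySem.Chars.isdigit c then (c.toNat : Int) - 48 else ((PySem.Chars.upperChar c).toNat : Int) - 55
def pvW (c : Char) : Int := if pvV c ≥ 10 then 100 else 10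
def pvNum (cs : List Char) (n : Int) : Int := cs.foldl (fun n c => n * pvW c + pvV c) n
def pvWprod (cs : List Char) : Int := (cs.map pvW).prod

theorem pvCharOfNat_toNat (n : Nat) (h : n < 55296) : (Char.ofNat n).toNat = n := by
  unfold Char.ofNat
  rw [dif_pos (by simp [Nat.isValidChar]; omega)]
  rfl

-- str(m) for 0 ≤ m ≤ 71 (the range ord(ch.upper()) - 55 can take on the admitted domain)
theorem pvToChars_small : ∀ m : Nat, m < 72 →
    PySem.Int.toChars (m : Int) =
      (if m < 10 then [Char.ofNat (48 + m)] else [Char.ofNat (48 + m / 10), Char.ofNat (48 + m % 10)]) := by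
  decide

-- int(c) for a single decimal digit character
theorem pvOfCharsDigit : ∀ m : Nat, m < 10 → PySem.Int.ofChars? [Char.ofNat (48 + m)] = some (m : Int) := by
  decide

theorem pvModAbsorb (x d : Int) :
    PySem.Int.mod (PySem.Int.mod x 97 * 10 + d) 97 = PySem.Int.mod (x * 10 + d) 97 := by
  rw [PySem.Int.mod_eq_emod_of_pos (by norm_num), PySem.Int.mod_eq_emod_of_pos (by norm_num),
    PySem.Int.mod_eq_emod_of_pos (by norm_num)]
  omega

theorem pvModAbsorb100 (x d : Int) :
    PySem.Int.mod (PySem.Int.mod x 97 * 100 + d) 97 = PySem.Int.mod (x * 100 + d) 97 := by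
  rw [PySem.Int.mod_eq_emod_of_pos (by norm_num), PySem.Int.mod_eq_emod_of_pos (by norm_num),
    PySem.Int.mod_eq_emod_of_pos (by norm_num)]
  omega

theorem pvModAdd (a b x : Int) : (a % 97 + x * (b % 97)) % 97 = (a + x * b) % 97 := by
  conv_lhs => rw [Int.add_emod, Int.mul_emod, Int.emod_emod_of_dvd _ (dvd_refl 97),
    Int.emod_emod_of_dvd _ (dvd_refl 97)]
  conv_rhs => rw [Int.add_emod, Int.mul_emod]

theorem pvModMul (a w : Int) : (a % 97 * w) % 97 = (a * w) % 97 := by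
  conv_lhs => rw [Int.mul_emod, Int.emod_emod_of_dvd _ (dvd_refl 97)]
  conv_rhs => rw [Int.mul_emod]

theorem pvUpper_le (c : Char) (h : pvDomChar c = true) : (PySem.Chars.upperChar c).toNat ≤ 126 := by
  have hc : c.toNat ≤ 126 := by
    simp [pvDomChar] at h
    omega
  unfold PySem.Chars.upperChar
  split_ifs with h1
  · rw [pvCharOfNat_toNat _ (by omega)]
    omega
  · exact hc

theorem pvDigit_bounds (c : Char) (h : PySem.Chars.isdigit c = true) :
    48 ≤ c.toNat ∧ c.toNat ≤ 57 := by
  simp [PySem.Chars.isdigit, Char.le_def] at h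
  exact ⟨h.1, h.2⟩

-- one step of A computes Horner-mod with the same v and w as the abstract number
theorem pvStepA (c : Char) (hdom : pvDomChar c = true)
    (hpre : PySem.Chars.isdigit c = true ∨ 55 ≤ (PySem.Chars.upperChar c).toNat) (n : Int) :
    mod97A_step (some (PySem.Int.mod n 97)) c = some (PySem.Int.mod (n * pvW c + pvV c) 97) := by
  unfold mod97A_step pvW pvV
  by_cases hd : PySem.Chars.isdigit c = true
  · obtain ⟨hl, hu⟩ := pvDigit_bounds c hd
    have hv : ¬ ((c.toNat : Int) - 48 ≥ 10) := by omega
    simp only [hd, if_pos, hv, if_false]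
    rw [pvModAbsorb]
  · have h55 : 55 ≤ (PySem.Chars.upperChar c).toNat := hpre.resolve_left hd
    have h126 : (PySem.Chars.upperChar c).toNat ≤ 126 := pvUpper_le c hdom
    set u := (PySem.Chars.upperChar c).toNat with hu
    have hm : ((u : Int) - 55) = ((u - 55 : Nat) : Int) := by omega
    set m : Nat := u - 55 with hmdef
    have hm72 : m < 72 := by omega
    simp only [hd, if_false, Bool.false_eq_true, hm]
    rw [pvToChars_small m hm72]
    by_cases h10 : m < 10
    · rw [if_pos h10]
      simp only [List.foldl_cons, List.foldl_nil, pvOfCharsDigit m h10]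
      rw [pvModAbsorb]
      rw [if_neg (by omega : ¬ ((m : Int) ≥ 10))]
    · rw [if_neg h10]
      simp only [List.foldl_cons, List.foldl_nil,
        pvOfCharsDigit (m / 10) (by omega), pvOfCharsDigit (m % 10) (by omega)]
      rw [pvModAbsorb]   -- absorbs the middle mod into the outer one
      have hsplit : (PySem.Int.mod n 97 * 10 + ((m / 10 : Nat) : Int)) * 10 + ((m % 10 : Nat) : Int)
          = PySem.Int.mod n 97 * 100 + (((m / 10 : Nat) : Int) * 10 + ((m % 10 : Nat) : Int)) := by
        ring
      rw [hsplit, pvModAbsorb100]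
      rw [if_pos (by omega : ((m : Int) ≥ 10))]
      congr 1
      have : ((m / 10 : Nat) : Int) * 10 + ((m % 10 : Nat) : Int) = (m : Int) := by
        push_cast
        omega
      rw [this]

theorem pvFoldA (cs : List Char)
    (h : ∀ c ∈ cs, pvDomChar c = true ∧
      (PySem.Chars.isdigit c = true ∨ 55 ≤ (PySem.Chars.upperChar c).toNat)) :
    ∀ n : Int, cs.foldl mod97A_step (some (PySem.Int.mod n 97)) =
      some (PySem.Int.mod (pvNum cs n) 97) := by
  induction cs with
  | nil => intro n; rfl
  | cons c cs ih =>
    intro n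
    obtain ⟨hdom, hpre⟩ := h c (List.mem_cons_self ..)
    simp only [List.foldl_cons]
    rw [pvStepA c hdom hpre n]
    exact ih (fun c hc => h c (List.mem_cons_of_mem _ hc)) _

-- prepending a character: its value is weighted by the product of the widths of the rest
theorem pvNum_shift (cs : List Char) : ∀ n : Int, pvNum cs n = n * pvWprod cs + pvNum cs 0 := by
  induction cs with
  | nil => intro n; simp [pvNum, pvWprod]
  | cons c cs ih =>
    intro n
    simp only [pvNum, List.foldl_cons, pvWprod, List.map_cons, List.prod_cons]
    rw [show cs.foldl (fun n c => n * pvW c + pvV c) (n * pvW c + pvV c) = pvNum cs (n * pvW c + pvV c) from rfl,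
      show cs.foldl (fun n c => n * pvW c + pvV c) (0 * pvW c + pvV c) = pvNum cs (0 * pvW c + pvV c) from rfl,
      ih (n * pvW c + pvV c), ih (0 * pvW c + pvV c)]
    simp only [pvWprod]
    ring

-- B's right-to-left fold carries (number mod 97, product of widths mod 97)
theorem pvFoldB (cs : List Char) :
    cs.reverse.foldl mod97B_step ((0 : Int), (1 : Int)) =
      (PySem.Int.mod (pvNum cs 0) 97, PySem.Int.mod (pvWprod cs) 97) := by
  induction cs with
  | nil => decide
  | cons c cs ih =>
    simp only [List.reverse_cons, List.foldl_append, List.foldl_cons, List.foldl_nil, ih]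
    unfold mod97B_step
    simp only [PySem.Int.mod_eq_emod_of_pos (by norm_num : (0:Int) < 97)]
    have hv : (if PySem.Chars.isdigit c then (c.toNat : Int) - 48
        else ((PySem.Chars.upperChar c).toNat : Int) - 55) = pvV c := rfl
    have hw : (if pvV c ≥ 10 then (100 : Int) else 10) = pvW c := rfl
    simp only [hv, hw]
    rw [Prod.mk.injEq]
    constructor
    · rw [pvModAdd]
      congr 1
      rw [pvNum_shift (c :: cs) 0, pvNum_shift cs 0]
      simp only [pvNum, List.foldl_cons, pvWprod, List.map_cons, List.prod_cons]
      rw [show cs.foldl (fun n c => n * pvW c + pvV c) (0 * pvW c + pvV c) = pvNum cs (0 * pvW c + pvV c) from rfl,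
        pvNum_shift cs (0 * pvW c + pvV c)]
      simp only [pvNum, pvWprod]
      ring
    · rw [pvModMul]
      congr 1
      simp only [pvWprod, List.map_cons, List.prod_cons]
      ring

-- ===== VERDICT (by name: the statement is the Claim_ definition above) =====
theorem mod97_py_spec : Claim_equal_mod97_py := by
  intro iban hdom hpre
  unfold Spec_mod97_py mod97_py mod97_py_alt
  by_cases hlen : iban.toList.length < 4
  · rw [if_pos hlen, if_pos hlen]
  · rw [if_neg hlen, if_neg hlen]
    have hall : ∀ c ∈ iban.toList, pvDomChar c = true ∧
        (PySem.Chars.isdigit c = true ∨ 55 ≤ (PySem.Chars.upperChar c).toNat) := by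
      intro c hc
      refine ⟨?_, ?_⟩
      · have := hdom
        unfold Dom_mod97_py pvDomStr at this
        exact List.all_eq_true.mp this c hc
      · have h := List.all_eq_true.mp (hpre.resolve_left hlen) c hc
        rcases Bool.or_eq_true .. |>.mp h with h | h
        · exact Or.inl h
        · exact Or.inr (of_decide_eq_true h)
    have hmem : ∀ c ∈ PySem.List.slice iban.toList (some 4) none ++
        PySem.List.slice iban.toList none (some 4), pvDomChar c = true ∧
        (PySem.Chars.isdigit c = true ∨ 55 ≤ (PySem.Chars.upperChar c).toNat) := by
      intro c hc
      rcases List.mem_append.mp hc with h | h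
      · exact hall c (PySem.List.mem_of_mem_slice _ _ _ h)
      · exact hall c (PySem.List.mem_of_mem_slice _ _ _ h)
    have h0 : (some (0 : Int)) = some (PySem.Int.mod 0 97) := by decide
    show (match List.foldl mod97A_step (some (0 : Int))
        (PySem.List.slice iban.toList (some 4) none ++ PySem.List.slice iban.toList none (some 4)) with
      | none => false
      | some r => r == 1) =
      (((PySem.List.slice iban.toList (some 4) none ++
        PySem.List.slice iban.toList none (some 4)).reverse.foldl mod97B_step ((0 : Int), (1 : Int))).1 == 1)
    rw [h0, pvFoldA _ hmem 0, pvFoldB]
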